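-- pv_equiv track=rewrite | github.com/tamhuy/IT3105 | project1/module2/csp.py | calculate_permutations
-- ===== SOURCE A (Python) =====
-- import itertools
-- import copy
--
-- def calculate_permutations(segment_domains, segments):
--     """ Calculate all the possible permutations of legal initial segment indexes
--         for a row or column
--
--     Args:
--         :param segment_domains: a list of lists of ranges of the segments, as calculated
--                                 in generate_segment_domains
--         :param segments:        a list of segment sizes
--     Returns:
--         :return: a list of tuples representing all legal permutations of initial segment indices
--     """
--     permutations = list(itertools.product(*segment_domains))
--     for list_element in copy.deepcopy(permutations):
--         for i in range(len(list_element) - 1):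
--             if isinstance(list_element, tuple):
--                 if not list_element[i] + segments[i] < list_element[i + 1]:
--                     if list_element in permutations:
--                         permutations.remove(list_element)
--                         break
--     return permutations
-- ===== SOURCE B (Python) =====
-- def calculate_permutations(segment_domains, segments):
--     """Backtracking generation: extend partial tuples left-to-right, pruning as
--     soon as the adjacency constraint fails, instead of filtering the full product."""
--     def extend(last, doms, segs):
--         if not doms:
--             return [()]
--         out = []
--         for v in doms[0]:
--             if last + segs[0] < v:
--                 out.extend((v,) + t for t in extend(v, doms[1:], segs[1:]))
--         return out
--     if any(not d for d in segment_domains):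
--         return []
--     if not segment_domains:
--         return [()]
--     return [(v,) + t
--             for v in segment_domains[0]
--             for t in extend(v, segment_domains[1:], segments)]
-- ===== Notes on version B (the rewrite author's own statement) =====
-- stated objective: faster
-- what changed: A materialises the full Cartesian product and then repeatedly scans it with 'in'/'remove' to delete invalid tuples (quadratic in the product size); B generates tuples by backtracking, pruning a partial tuple as soon as an adjacent pair violates the ordering constraint, so invalid branches are never expanded and no list scans occur.
-- outside the precondition, e.g. on calculate_permutations([[5], [1], [2]], [9]): A returns [], B returns []
import Mathlib
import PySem

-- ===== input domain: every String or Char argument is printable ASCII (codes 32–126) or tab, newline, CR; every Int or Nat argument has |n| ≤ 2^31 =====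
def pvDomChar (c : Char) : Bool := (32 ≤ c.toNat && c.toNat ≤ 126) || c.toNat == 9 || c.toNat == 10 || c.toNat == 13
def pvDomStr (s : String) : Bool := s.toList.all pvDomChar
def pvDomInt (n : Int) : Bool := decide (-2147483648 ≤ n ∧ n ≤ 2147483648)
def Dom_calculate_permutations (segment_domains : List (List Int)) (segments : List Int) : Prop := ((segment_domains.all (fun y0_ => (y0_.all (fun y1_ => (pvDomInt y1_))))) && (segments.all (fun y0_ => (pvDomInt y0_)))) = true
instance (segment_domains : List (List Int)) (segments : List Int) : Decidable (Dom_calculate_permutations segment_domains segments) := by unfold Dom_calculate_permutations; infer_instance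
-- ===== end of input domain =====

-- B replaces A's product-then-remove filtering by backtracking generation that
-- prunes invalid partial tuples and never rescans the output list.

-- ===== PORT A =====
-- itertools.product(*segment_domains), first coordinate varying slowest
def pyProduct (ds : List (List Int)) : List (List Int) :=
  match ds with
  | [] => [[]]
  | d :: rest => d.flatMap (fun x => (pyProduct rest).map (fun ys => x :: ys))

-- A's inner 'for i in range(len(list_element) - 1)' loop: true iff some adjacent
-- pair fails 'list_element[i] + segments[i] < list_element[i+1]' (the break/remove
-- branch fires).  Where Python A raises IndexError (segments exhausted before the
-- scan ends) this arbitrarily returns true; such inputs are excluded by Pre_.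
def scanBad (xs : List Int) (segs : List Int) : Bool :=
  match xs, segs with
  | a :: b :: rest, s :: srest => if ¬ (a + s < b) then true else scanBad (b :: rest) srest
  | _ :: _ :: _, [] => true
  | _, _ => false

-- one iteration of A's outer loop over the deepcopy: remove the first occurrence
-- of t if the inner scan found a violated pair and t is still in the list
def removeStep (segs : List Int) (perms : List (List Int)) (t : List Int) : List (List Int) :=
  if scanBad t segs then
    if t ∈ perms then ((PySem.List.remove? perms t).getD perms) else perms
  else perms

def calculate_permutations (segment_domains : List (List Int)) (segments : List Int) : List (List Int) :=
  let permutations := pyProduct segment_domains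
  permutations.foldl (removeStep segments) permutations

-- ===== PORT B =====
-- Source B's extend(last, doms, segs): every completion of a partial tuple ending in
-- 'last'; a value is expanded only if the adjacency constraint holds.  Where
-- Source B raises IndexError (segs exhausted while doms remain) this returns [];
-- such inputs are excluded by Pre_.
def buildRest (last : Int) (doms : List (List Int)) (segs : List Int) : List (List Int) :=
  match doms, segs with
  | [], _ => [[]]
  | d :: rest, s :: srest =>
      d.flatMap (fun v => if last + s < v then (buildRest v rest srest).map (fun t => v :: t) else [])
  | _ :: _, [] => []

def calculate_permutations_alt (segment_domains : List (List Int)) (segments : List Int) : List (List Int) :=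
  if segment_domains.any (fun d => d.isEmpty) then [] else
  match segment_domains with
  | [] => [[]]
  | d :: rest => d.flatMap (fun v => (buildRest v rest segments).map (fun t => v :: t))

-- ===== PRECONDITION & SPEC =====
-- Pre_ excludes inputs where the Python can raise IndexError: segments must index
-- every adjacent pair of the (nonempty) product, i.e. cover len-1 positions, unless
-- some domain is empty (empty product, no iteration).  Slightly narrower than A's
-- exact no-raise set: with too-short segments A still returns when every tuple hits
-- a violated pair before the missing index (cited example in claim.json).
def Pre_calculate_permutations (segment_domains : List (List Int)) (segments : List Int) : Prop :=
  segment_domains.length ≤ segments.length + 1 ∨ ∃ d ∈ segment_domains, d = []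
instance (segment_domains : List (List Int)) (segments : List Int) : Decidable (Pre_calculate_permutations segment_domains segments) := by unfold Pre_calculate_permutations; infer_instance

def pvWitness_calculate_permutations : List (List Int) × List Int := ([[0, 3], [2, 5]], [1])

def Spec_calculate_permutations (segment_domains : List (List Int)) (segments : List Int) (out : List (List Int)) : Prop := out = calculate_permutations_alt segment_domains segments
instance (segment_domains : List (List Int)) (segments : List Int) (out : List (List Int)) : Decidable (Spec_calculate_permutations segment_domains segments out) := by unfold Spec_calculate_permutations; infer_instance

-- ===== CLAIM (what is proved, stated in full; the proofs are below) =====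
def Claim_equal_calculate_permutations : Prop := ∀ (segment_domains : List (List Int)) (segments : List Int), Dom_calculate_permutations segment_domains segments → Pre_calculate_permutations segment_domains segments → Spec_calculate_permutations segment_domains segments (calculate_permutations segment_domains segments)

-- ===== LEMMAS AND PROOFS =====

-- the per-tuple "kept" predicate B enforces on the tail of a tuple after 'last'
def goodChain (last : Int) (xs : List Int) (segs : List Int) : Bool :=
  match xs, segs with
  | [], _ => true
  | b :: rest, s :: srest => (last + s < b) && goodChain b rest srest
  | _ :: _, [] => false

theorem scanBad_cons (a : Int) (xs segs : List Int) :
    scanBad (a :: xs) segs = !(goodChain a xs segs) := by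
  induction xs generalizing a segs with
  | nil => cases segs <;> simp [scanBad, goodChain]
  | cons b rest ih =>
      cases segs with
      | nil => simp [scanBad, goodChain]
      | cons s srest =>
          by_cases h : a + s < b <;> simp [scanBad, goodChain, h, ih]

theorem filter_erase_of_bad (p : List Int → Bool) (t : List Int) (P : List (List Int))
    (h : p t = false) : (P.erase t).filter p = P.filter p := by
  induction P with
  | nil => simp
  | cons x xs ih =>
      by_cases hx : x = t
      · subst hx; simp [List.erase_cons_head, h]
      · rw [List.erase_cons_tail (by simpa using hx)]
        simp [List.filter_cons, ih]

theorem foldl_removeStep (segs : List Int) (T : List (List Int)) :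
    ∀ P : List (List Int),
      (∀ t, scanBad t segs = true → P.count t ≤ T.count t) →
      T.foldl (removeStep segs) P = P.filter (fun t => !scanBad t segs) := by
  induction T with
  | nil =>
      intro P h
      simp only [List.foldl_nil]
      symm
      apply List.filter_eq_self.mpr
      intro t ht
      have hc := List.count_pos_iff.mpr ht
      cases hb : scanBad t segs with
      | false => simp [hb]
      | true =>
          exact absurd (h t hb) (by simp [List.count_nil]; omega)
  | cons t0 T' ih =>
      intro P h
      simp only [List.foldl_cons]
      by_cases hb : scanBad t0 segs
      · by_cases hm : t0 ∈ P
        · rw [show removeStep segs P t0 = P.erase t0 by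
            simp [removeStep, hb, hm, PySem.List.remove?_eq_some_erase _ _ hm]]
          rw [ih (P.erase t0) (by
            intro t ht
            have := h t ht
            by_cases he : t = t0
            · subst he
              rw [List.count_erase_self]
              simp only [List.count_cons, beq_iff_eq] at this
              simp at this ⊢
              omega
            · rw [List.count_erase_of_ne (by simpa using he)]
              simp only [List.count_cons, beq_iff_eq] at this
              rw [if_neg (fun hh => he hh.symm)] at this
              simpa using this)]
          exact filter_erase_of_bad _ t0 P (by simp [hb])
        · rw [show removeStep segs P t0 = P by simp [removeStep, hb, hm]]
          exact ih P (by
            intro t ht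
            have := h t ht
            by_cases he : t = t0
            · subst he
              simp [List.count_eq_zero_of_not_mem hm]
            · simp only [List.count_cons, beq_iff_eq] at this
              rw [if_neg (fun hh => he hh.symm)] at this
              simpa using this)
      · rw [show removeStep segs P t0 = P by simp [removeStep, hb]]
        exact ih P (by
          intro t ht
          have := h t ht
          have hne : t ≠ t0 := by rintro rfl; simp [hb] at ht
          simp only [List.count_cons, beq_iff_eq] at this
          rw [if_neg (fun hh => hne hh.symm)] at this
          simpa using this)

theorem calcA_eq_filter (ds : List (List Int)) (segs : List Int) :
    calculate_permutations ds segs = (pyProduct ds).filter (fun t => !scanBad t segs) := by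
  unfold calculate_permutations
  exact foldl_removeStep segs (pyProduct ds) (pyProduct ds) (fun _ _ => le_refl _)

theorem buildRest_eq_filter (ds : List (List Int)) :
    ∀ (last : Int) (segs : List Int),
      buildRest last ds segs = (pyProduct ds).filter (fun t => goodChain last t segs) := by
  induction ds with
  | nil => intro last segs; simp [buildRest, pyProduct, goodChain]
  | cons d rest ih =>
      intro last segs
      cases segs with
      | nil =>
          simp only [buildRest, pyProduct, List.filter_flatMap]
          symm
          apply List.flatMap_eq_nil_iff.mpr
          intro x _
          rw [List.filter_map]
          simp [Function.comp_def, goodChain]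
      | cons s srest =>
          simp only [buildRest, pyProduct, List.filter_flatMap]
          have hf : (fun v => if last + s < v then (buildRest v rest srest).map (fun t => v :: t) else ([] : List (List Int)))
              = (fun v => ((pyProduct rest).map (fun ys => v :: ys)).filter (fun t => goodChain last t (s :: srest))) := by
            funext v
            rw [List.filter_map]
            by_cases h : last + s < v
            · rw [if_pos h]
              rw [ih v srest]
              congr 1
              apply List.filter_congr
              intro t _
              simp [Function.comp, goodChain, h]
            · rw [if_neg h]
              symm
              simp only [List.map_eq_nil_iff, List.filter_eq_nil_iff]
              intro t _
              simp [Function.comp, goodChain, h]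
          rw [hf]

theorem pyProduct_of_mem_nil (ds : List (List Int)) (h : [] ∈ ds) : pyProduct ds = [] := by
  induction ds with
  | nil => simp at h
  | cons d rest ih =>
      rcases List.mem_cons.mp h with h | h
      · simp [pyProduct, ← h]
      · simp [pyProduct, ih h]

theorem calcAB (ds : List (List Int)) (segs : List Int) :
    calculate_permutations ds segs = calculate_permutations_alt ds segs := by
  rw [calcA_eq_filter]
  unfold calculate_permutations_alt
  by_cases he : ds.any (fun d => d.isEmpty)
  · rw [if_pos he]
    obtain ⟨d, hd, hde⟩ := List.any_eq_true.mp he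
    rw [pyProduct_of_mem_nil ds (by rwa [List.isEmpty_iff.mp hde] at hd)]
    simp
  rw [if_neg he]
  cases ds with
  | nil => simp [pyProduct, calculate_permutations_alt, scanBad]
  | cons d rest =>
      simp only [pyProduct, calculate_permutations_alt, List.filter_flatMap]
      have hf : (fun v => ((pyProduct rest).map (fun ys => v :: ys)).filter (fun t => !scanBad t segs))
          = (fun v => (buildRest v rest segs).map (fun t => v :: t)) := by
        funext v
        rw [List.filter_map, buildRest_eq_filter]
        congr 1
        apply List.filter_congr
        intro t _
        simp [Function.comp, scanBad_cons]
      rw [hf]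

-- ===== VERDICT (by name: the statement is the Claim_ definition above) =====
theorem calculate_permutations_spec : Claim_equal_calculate_permutations := by
  intro ds segs _ _
  unfold Spec_calculate_permutations
  exact calcAB ds segs
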